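-- pv_equiv track=rewrite | github.com/minjacho42/algorithm | 9519.py | stepper
-- ===== SOURCE A (Python) =====
-- from collections import deque
--
-- def stepper(word, word_len):
--     que = deque(word)
--     pop_idx = range(word_len - 2 if word_len % 2 == 1 else word_len - 3, 0, -2)
--     for i in pop_idx:
--         que.append(que[i])
--     for i in pop_idx:
--         del que[i]
--     return ''.join(que)
-- ===== SOURCE B (Python) =====
-- def stepper(word, word_len):
--     s = word_len - 2 if word_len % 2 == 1 else word_len - 3
--     if s < 1:
--         return word
--     head, tail = word[:s+1], word[s+1:]
--     evens, odds = [], []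
--     for i, c in enumerate(head):
--         (evens if i % 2 == 0 else odds).append(c)
--     return ''.join(evens) + tail + ''.join(reversed(odds))
-- ===== Notes on version B (the rewrite author's own statement) =====
-- stated objective: faster
-- what changed: A simulates a deque, appending que[i] for each descending odd pop index and then deleting each of those indices one by one (each deque del is linear); B computes the cut point once, splits the moved prefix into even/odd positions in a single enumerate pass and concatenates evens + tail + reversed odds.
import Mathlib
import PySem

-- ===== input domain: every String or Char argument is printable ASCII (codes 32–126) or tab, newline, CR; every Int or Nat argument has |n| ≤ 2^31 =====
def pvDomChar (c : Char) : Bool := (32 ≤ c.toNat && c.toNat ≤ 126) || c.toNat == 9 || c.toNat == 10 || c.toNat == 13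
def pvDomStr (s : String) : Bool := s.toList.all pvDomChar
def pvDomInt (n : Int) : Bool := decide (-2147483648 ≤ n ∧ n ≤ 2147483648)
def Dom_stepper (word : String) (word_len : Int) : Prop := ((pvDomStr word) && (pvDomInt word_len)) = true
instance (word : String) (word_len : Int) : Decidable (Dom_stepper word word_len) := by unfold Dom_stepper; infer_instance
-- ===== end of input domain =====

-- B replaces A's quadratic deque append/delete index loops by one linear split of the
-- moved prefix into even/odd positions (objective: faster, asymptotic O(n^2) -> O(n)).

-- ===== PORT A =====
-- for i in pop_idx: que.append(que[i])   (que[i] raising IndexError = none)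
def stepperAppendLoop (que : List Char) (idxs : List Int) : Option (List Char) :=
  match idxs with
  | [] => some que
  | i :: rest =>
    match PySem.List.pyGet? que i with
    | none => none
    | some c => stepperAppendLoop (que ++ [c]) rest

-- for i in pop_idx: del que[i]
def stepperDelLoop (que : List Char) (idxs : List Int) : Option (List Char) :=
  match idxs with
  | [] => some que
  | i :: rest =>
    match PySem.List.pop? que i with
    | none => none
    | some (_, q) => stepperDelLoop q rest

def stepper (word : String) (word_len : Int) : String :=
  let que := word.toList
  let popIdx := PySem.List.pyRange
    (if PySem.Int.mod word_len 2 == 1 then word_len - 2 else word_len - 3) 0 (-2)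
  match stepperAppendLoop que popIdx with
  | none => ""
  | some q1 =>
    match stepperDelLoop q1 popIdx with
    | none => ""
    | some q2 => String.ofList q2

-- ===== PORT B =====
-- for i, c in enumerate(head): (evens if i % 2 == 0 else odds).append(c)
def stepperSplitLoop (pairs : List (Int × Char)) (evens odds : List Char) : List Char × List Char :=
  match pairs with
  | [] => (evens, odds)
  | (i, c) :: rest =>
    if PySem.Int.mod i 2 == 0 then stepperSplitLoop rest (evens ++ [c]) odds
    else stepperSplitLoop rest evens (odds ++ [c])

def stepper_alt (word : String) (word_len : Int) : String :=
  let s := if PySem.Int.mod word_len 2 == 1 then word_len - 2 else word_len - 3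
  if s < 1 then word
  else
    let l := word.toList
    let head := PySem.List.slice l none (some (s + 1))
    let tail := PySem.List.slice l (some (s + 1)) none
    let p := stepperSplitLoop (PySem.List.enumerate head) [] []
    String.ofList (p.1 ++ tail ++ p.2.reverse)

-- ===== PRECONDITION & SPEC =====
-- Pre_ excludes exactly the inputs where A raises IndexError: que[i] with the first
-- (largest) pop index at or beyond len(word).
def Pre_stepper (word : String) (word_len : Int) : Prop :=
  (if PySem.Int.mod word_len 2 == 1 then word_len - 2 else word_len - 3) ≤ 0 ∨
  (if PySem.Int.mod word_len 2 == 1 then word_len - 2 else word_len - 3) < (word.toList.length : Int)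
instance (word : String) (word_len : Int) : Decidable (Pre_stepper word word_len) := by unfold Pre_stepper; infer_instance
def pvWitness_stepper : String × Int := ("hello", 5)

def Spec_stepper (word : String) (word_len : Int) (out : String) : Prop := out = stepper_alt word word_len
instance (word : String) (word_len : Int) (out : String) : Decidable (Spec_stepper word word_len out) := by unfold Spec_stepper; infer_instance

-- ===== CLAIM (what is proved, stated in full; the proofs are below) =====
def Claim_equal_stepper : Prop := ∀ (word : String) (word_len : Int), Dom_stepper word word_len → Pre_stepper word word_len → Spec_stepper word word_len (stepper word word_len)

-- ===== LEMMAS AND PROOFS =====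

-- proof-side: the (even-position, odd-position) split of a list
def pvEO : List Char → List Char × List Char
  | [] => ([], [])
  | [a] => ([a], [])
  | a :: b :: t => ((pvEO t).1.cons a, (pvEO t).2.cons b)

lemma pvEO_append_pair (xs : List Char) (hx : xs.length % 2 = 0) (a b : Char) :
    pvEO (xs ++ [a, b]) = ((pvEO xs).1 ++ [a], (pvEO xs).2 ++ [b]) := by
  induction xs using pvEO.induct with
  | case1 => rfl
  | case2 c => simp at hx
  | case3 c d t ih =>
    simp at hx
    simp only [List.cons_append, pvEO, ih (by omega)]

lemma take_two_split (l : List Char) (k : Nat) (h : k + 1 < l.length) :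
    l.take (k + 2) = l.take k ++ [l[k], l[k + 1]] := by
  have h1 : k < l.length := by omega
  rw [List.take_add]
  congr 1
  rw [List.drop_eq_getElem_cons h1,
      show l.drop (k + 1) = l[k + 1] :: l.drop (k + 2) from List.drop_eq_getElem_cons h]
  rfl

lemma pyRange_neg_two_nil (s : Int) (h : s ≤ 0) : PySem.List.pyRange s 0 (-2) = [] := by
  simp [PySem.List.pyRange]
  intros; omega

lemma pyRange_neg_two_cons (s : Int) (h : 1 ≤ s) :
    PySem.List.pyRange s 0 (-2) = s :: PySem.List.pyRange (s - 2) 0 (-2) := by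
  unfold PySem.List.pyRange
  norm_num
  rw [if_pos (by omega : (0:Int) < s)]
  by_cases h2 : (2:Int) < s
  · rw [if_pos h2, show ((s + 2 - 1) / 2).toNat = ((s - 1) / 2).toNat + 1 from by omega,
        List.range_succ_eq_map]
    simp [List.map_map, Function.comp_def]
    intro a _; ring
  · rw [if_neg h2, show ((s + 2 - 1) / 2).toNat = 1 from by omega]
    simp

lemma mem_pyRange_neg_two (s i : Int) (h : i ∈ PySem.List.pyRange s 0 (-2)) : 0 < i ∧ i ≤ s := by
  unfold PySem.List.pyRange at h
  norm_num at h
  split at h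
  · obtain ⟨k, hk, rfl⟩ := h
    omega
  · simp at h

lemma splitLoop_spec (xs : List Char) : ∀ (m : Nat) (e o : List Char),
    stepperSplitLoop (PySem.List.enumerate xs ((2 * m : Nat) : Int)) e o =
      (e ++ (pvEO xs).1, o ++ (pvEO xs).2) := by
  induction xs using pvEO.induct with
  | case1 => intro m e o; simp [PySem.List.enumerate, stepperSplitLoop, pvEO]
  | case2 a =>
    intro m e o
    have hm : PySem.Int.mod ((2 * m : Nat) : Int) 2 = 0 := by
      rw [PySem.Int.mod_eq_emod_of_pos (by norm_num)]; omega
    simp [PySem.List.enumerate, stepperSplitLoop, pvEO]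
  | case3 a b t ih =>
    intro m e o
    have hm : PySem.Int.mod ((2 * m : Nat) : Int) 2 = 0 := by
      rw [PySem.Int.mod_eq_emod_of_pos (by norm_num)]; omega
    have hm1 : PySem.Int.mod (((2 * m : Nat) : Int) + 1) 2 = 1 := by
      rw [PySem.Int.mod_eq_emod_of_pos (by norm_num)]; omega
    have hcast : ((2 * m : Nat) : Int) + 1 + 1 = ((2 * (m + 1) : Nat) : Int) := by push_cast; ring
    rw [PySem.List.enumerate_cons, PySem.List.enumerate_cons, hcast]
    simp only [stepperSplitLoop, hm, hm1]
    norm_num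
    rw [show (2 * ((m:Int) + 1)) = ((2 * (m + 1) : Nat) : Int) from by push_cast; ring, ih (m + 1)]
    simp [pvEO]
lemma appendLoop_spec (idxs : List Int) : ∀ (base ext : List Char),
    (∀ i ∈ idxs, 0 ≤ i ∧ i < (base.length : Int)) →
    stepperAppendLoop (base ++ ext) idxs =
      some (base ++ (ext ++ idxs.map (fun i => PySem.List.pyGetD base i ' '))) := by
  induction idxs with
  | nil => intro base ext _; simp [stepperAppendLoop]
  | cons i rest ih =>
    intro base ext h
    obtain ⟨h0, hlt⟩ := h i (by simp)
    have hi : i.toNat < base.length := by omega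
    have hget : PySem.List.pyGet? (base ++ ext) i = some base[i.toNat] := by
      rw [PySem.List.pyGet?_of_nonneg _ h0, List.getElem?_append_left hi,
          List.getElem?_eq_getElem hi]
    have hgd : PySem.List.pyGetD base i ' ' = base[i.toNat] := by
      simp [PySem.List.pyGetD, PySem.List.pyGet?_of_nonneg _ h0, List.getElem?_eq_getElem hi]
    simp only [stepperAppendLoop, hget]
    rw [show base ++ ext ++ [base[i.toNat]] = base ++ (ext ++ [base[i.toNat]]) from by simp,
        ih base (ext ++ [base[i.toNat]]) (fun j hj => h j (by simp [hj]))]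
    simp [hgd]
lemma moved_spec (s : Nat) (hodd : s % 2 = 1) : ∀ (l : List Char), s < l.length →
    (PySem.List.pyRange (s : Int) 0 (-2)).map (fun i => PySem.List.pyGetD l i ' ') =
      ((pvEO (l.take (s + 1))).2).reverse := by
  induction s using Nat.strong_induction_on with
  | _ s ih =>
    intro l hs
    obtain ⟨k, rfl⟩ : ∃ k, s = k + 1 := ⟨s - 1, by omega⟩
    have htake : l.take (k + 1 + 1) = l.take k ++ [l[k], l[k + 1]] := take_two_split l k hs
    have hlen : (l.take k).length % 2 = 0 := by
      rw [List.length_take]; omega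
    rw [htake, pvEO_append_pair _ hlen]
    rw [pyRange_neg_two_cons _ (by omega : 1 ≤ ((k + 1 : Nat) : Int))]
    have hgd : PySem.List.pyGetD l ((k + 1 : Nat) : Int) ' ' = l[k + 1] := by
      rw [PySem.List.pyGetD, PySem.List.pyGet?_of_nonneg _ (by omega : (0:Int) ≤ ((k + 1 : Nat) : Int)),
          show (((k + 1 : Nat)) : Int).toNat = k + 1 from by omega, List.getElem?_eq_getElem hs]
      rfl
    simp only [List.map_cons, hgd, List.reverse_append]
    norm_num
    by_cases h3 : 2 ≤ k
    · rw [show ((k:Int) + 1 - 2) = ((k - 1 : Nat) : Int) from by omega]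
      rw [ih (k - 1) (by omega) (by omega) l (by omega)]
      rw [show (k - 1) + 1 = k from by omega]
    · have hk0 : k = 0 := by omega
      subst hk0
      rw [pyRange_neg_two_nil _ (by norm_num)]
      simp [pvEO]
lemma take_one_getElem (l : List Char) (k : Nat) (h : k < l.length) :
    List.take 1 (List.drop k l) = [l[k]] := by
  rw [List.drop_eq_getElem_cons h]
  rfl

lemma delLoop_spec (s : Nat) (hodd : s % 2 = 1) : ∀ (l ext : List Char), s < l.length →
    stepperDelLoop (l ++ ext) (PySem.List.pyRange (s : Int) 0 (-2)) =
      some ((pvEO (l.take (s + 1))).1 ++ (l.drop (s + 1) ++ ext)) := by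
  induction s using Nat.strong_induction_on with
  | _ s ih =>
    intro l ext hs
    obtain ⟨k, rfl⟩ : ∃ k, s = k + 1 := ⟨s - 1, by omega⟩
    have hs' : k + 1 < (l ++ ext).length := by simp; omega
    have hpop := PySem.List.pop?_natCast (l ++ ext) (k + 1) hs'
    rw [pyRange_neg_two_cons _ (by omega : 1 ≤ ((k + 1 : Nat) : Int))]
    simp only [stepperDelLoop, hpop]
    rw [List.eraseIdx_append_of_lt_length hs ext, List.eraseIdx_eq_take_drop_succ]
    have htake : l.take (k + 1 + 1) = l.take k ++ [l[k], l[k + 1]] := take_two_split l k hs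
    have hlen : (l.take k).length % 2 = 0 := by rw [List.length_take]; omega
    by_cases h3 : 2 ≤ k
    · rw [show (((k + 1 : Nat)) : Int) - 2 = ((k - 1 : Nat) : Int) from by omega]
      rw [List.append_assoc]
      rw [ih (k - 1) (by omega) (by omega) (l.take (k + 1)) (l.drop (k + 1 + 1) ++ ext)
            (by rw [List.length_take]; omega)]
      rw [show k - 1 + 1 = k from by omega]
      rw [List.take_take, show min k (k + 1) = k from by omega]
      rw [List.drop_take, show k + 1 - k = 1 from by omega, take_one_getElem l k (by omega)]
      rw [htake, pvEO_append_pair _ hlen]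
      simp
    · have hk0 : k = 0 := by omega
      subst hk0
      rw [pyRange_neg_two_nil _ (by norm_num)]
      simp only [stepperDelLoop]
      rw [htake, pvEO_append_pair _ (by simp)]
      have ht1 : l.take 1 = [l[0]] := by
        simpa using take_one_getElem l 0 (by omega)
      rw [ht1]
      simp [pvEO]
-- ===== VERDICT (by name: the statement is the Claim_ definition above) =====
theorem stepper_spec : Claim_equal_stepper := by
  intro word word_len _ hpre
  unfold Spec_stepper stepper stepper_alt
  dsimp only
  unfold Pre_stepper at hpre
  have hodd : (if PySem.Int.mod word_len 2 == 1 then word_len - 2 else word_len - 3) % 2 = 1 := by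
    have hm0 : PySem.Int.mod word_len 2 = word_len % 2 :=
      PySem.Int.mod_eq_emod_of_pos (by norm_num)
    rcases (instDecidableEqBool (PySem.Int.mod word_len 2 == 1) true).em with hb | hb
    · have h1 : PySem.Int.mod word_len 2 = 1 := by simpa using hb
      rw [if_pos hb]
      omega
    · have h1 : PySem.Int.mod word_len 2 ≠ 1 := by simpa using hb
      rw [if_neg hb]
      omega
  generalize hg : (if PySem.Int.mod word_len 2 == 1 then word_len - 2 else word_len - 3) = e at hpre hodd ⊢
  by_cases h0 : e < 1
  · rw [if_pos h0, pyRange_neg_two_nil _ (by omega)]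
    simp [stepperAppendLoop, stepperDelLoop]
  · rw [if_neg h0]
    have h1 : 1 ≤ e := by omega
    have hlt : e < (word.toList.length : Int) := by omega
    obtain ⟨sn, rfl⟩ : ∃ sn : Nat, e = (sn : Int) := ⟨e.toNat, by omega⟩
    have hsn1 : 1 ≤ sn := by omega
    have hsodd : sn % 2 = 1 := by omega
    have hslt : sn < word.toList.length := by omega
    have hbounds : ∀ i ∈ PySem.List.pyRange (sn : Int) 0 (-2),
        0 ≤ i ∧ i < (word.toList.length : Int) := by
      intro i hi
      have := mem_pyRange_neg_two _ _ hi
      omega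
    have happ := appendLoop_spec (PySem.List.pyRange (sn : Int) 0 (-2)) word.toList [] hbounds
    simp only [List.append_nil, List.nil_append] at happ
    rw [happ]
    dsimp only
    rw [delLoop_spec sn hsodd word.toList _ hslt]
    dsimp only
    rw [moved_spec sn hsodd word.toList hslt]
    have hhead : PySem.List.slice word.toList none (some ((sn : Int) + 1)) = word.toList.take (sn + 1) := by
      rw [PySem.List.slice_to _ (by omega : (0:Int) ≤ (sn : Int) + 1),
          show ((sn : Int) + 1).toNat = sn + 1 from by omega]
    have htail : PySem.List.slice word.toList (some ((sn : Int) + 1)) none = word.toList.drop (sn + 1) := by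
      rw [PySem.List.slice_from _ (by omega : (0:Int) ≤ (sn : Int) + 1),
          show ((sn : Int) + 1).toNat = sn + 1 from by omega]
    rw [hhead, htail]
    have hsplit := splitLoop_spec (word.toList.take (sn + 1)) 0 [] []
    simp only [Nat.mul_zero, Nat.cast_zero, List.nil_append] at hsplit
    rw [hsplit]
    simp [List.append_assoc]
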